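-- pv_equiv track=rewrite | github.com/edoardottt/programming-fundamentals | programming_lab/lab161019/lista_compl.py | calcola_complemento2
-- ===== SOURCE A (Python) =====
-- def calcola_complemento2(numero):
--     n = 1
--     a = numero
--     while a // 10 > 0:
--         n += 1
--         a //= 10
--     complemento = 10 ** n - numero
--     return complemento
-- ===== SOURCE B (Python) =====
-- def calcola_complemento2(numero):
--     if numero < 10:
--         return 10 - numero
--     q, r = divmod(numero, 10)
--     return 10 * calcola_complemento2(q) - r
-- ===== Notes on version B (the rewrite author's own statement) =====
-- stated objective: alternative
-- what changed: B computes the ten's complement digit-wise by recursion: it recurses on the number with its last digit stripped off and combines (ten times the sub-complement minus the last digit), never counting digits and never building a power of ten, replacing A's digit-counting loop plus exponentiation.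
import Mathlib
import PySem

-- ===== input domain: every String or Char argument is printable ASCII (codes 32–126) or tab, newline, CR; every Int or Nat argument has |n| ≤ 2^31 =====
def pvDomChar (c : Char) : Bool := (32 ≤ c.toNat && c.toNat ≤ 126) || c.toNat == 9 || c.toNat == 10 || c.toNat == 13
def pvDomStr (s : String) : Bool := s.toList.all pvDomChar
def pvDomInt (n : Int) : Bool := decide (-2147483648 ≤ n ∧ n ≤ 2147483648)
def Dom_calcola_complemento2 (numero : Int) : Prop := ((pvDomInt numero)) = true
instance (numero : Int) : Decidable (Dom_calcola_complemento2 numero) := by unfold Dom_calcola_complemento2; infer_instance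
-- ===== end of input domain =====

-- B computes the ten's complement digit-wise by recursion on numero // 10, with no digit
-- counting and no power of ten (objective: alternative).

-- ===== PORT A =====
-- termination fact for A's while loop: if a // 10 > 0 then a // 10 shrinks (cited by decreasing_by)
theorem pvALoop_dec (a : Int) (h : 0 < PySem.Int.floordiv a 10) :
    (PySem.Int.floordiv a 10).toNat < a.toNat := by
  have h10 : (0:Int) < 10 := by norm_num
  have ha : 10 ≤ a := by
    have := (PySem.Int.le_floordiv_iff_mul_le (a := a) (b := 10) (q := 1) h10).mp h
    omega
  have hlt : PySem.Int.floordiv a 10 < a :=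
    (PySem.Int.floordiv_lt_iff_lt_mul (a := a) (b := 10) (q := a) h10).mpr (by nlinarith)
  omega

-- the while loop of A: state (n, a), returns the final n
def pvALoop (n a : Int) : Int :=
  if 0 < PySem.Int.floordiv a 10 then
    pvALoop (n + 1) (PySem.Int.floordiv a 10)
  else n
termination_by a.toNat
decreasing_by exact pvALoop_dec a (by assumption)

-- 10 ** n : n = pvALoop 1 numero is always ≥ 1, so (10:Int) ^ n.toNat is Python's 10 ** n exactly
def calcola_complemento2 (numero : Int) : Int :=
  (10:Int) ^ (pvALoop 1 numero).toNat - numero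

-- ===== PORT B =====
-- termination fact for B's recursion (cited by decreasing_by)
theorem pvBRec_dec (numero : Int) (h : ¬ numero < 10) :
    (PySem.Int.floordiv numero 10).toNat < numero.toNat := by
  have h10 : (0:Int) < 10 := by norm_num
  have hlt : PySem.Int.floordiv numero 10 < numero :=
    (PySem.Int.floordiv_lt_iff_lt_mul (a := numero) (b := 10) (q := numero) h10).mpr
      (by nlinarith)
  have hge : 1 ≤ PySem.Int.floordiv numero 10 :=
    (PySem.Int.le_floordiv_iff_mul_le (a := numero) (b := 10) (q := 1) h10).mpr (by omega)
  omega

def calcola_complemento2_alt (numero : Int) : Int :=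
  if numero < 10 then 10 - numero
  else
    10 * calcola_complemento2_alt (PySem.Int.floordiv numero 10) - PySem.Int.mod numero 10
termination_by numero.toNat
decreasing_by exact pvBRec_dec numero (by assumption)

-- ===== PRECONDITION & SPEC =====
def Spec_calcola_complemento2 (numero : Int) (out : Int) : Prop := out = calcola_complemento2_alt numero
instance (numero : Int) (out : Int) : Decidable (Spec_calcola_complemento2 numero out) := by unfold Spec_calcola_complemento2; infer_instance

-- ===== CLAIM =====
def Claim_equal_calcola_complemento2 : Prop := ∀ (numero : Int), Dom_calcola_complemento2 numero → Spec_calcola_complemento2 numero (calcola_complemento2 numero)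

-- ===== LEMMAS AND PROOFS =====

theorem pvALoop_shift (n a : Int) : pvALoop (n + 1) a = pvALoop n a + 1 := by
  induction n, a using pvALoop.induct with
  | case1 n a h ih =>
      rw [pvALoop, if_pos h]
      conv_rhs => rw [pvALoop, if_pos h]
      exact ih
  | case2 n a h =>
      rw [pvALoop, if_neg h]
      conv_rhs => rw [pvALoop, if_neg h]

theorem pvALoop_ge (n a : Int) : n ≤ pvALoop n a := by
  induction n, a using pvALoop.induct with
  | case1 n a h ih =>
      rw [pvALoop, if_pos h, pvALoop_shift]
      rw [pvALoop_shift] at ih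
      omega
  | case2 n a h => rw [pvALoop, if_neg h]

-- B's recursion equals A's closed value 10 ^ (digit count) - numero
theorem alt_eq (numero : Int) :
    calcola_complemento2_alt numero = (10:Int) ^ (pvALoop 1 numero).toNat - numero := by
  induction numero using calcola_complemento2_alt.induct with
  | case1 numero h =>
      have h10 : (0:Int) < 10 := by norm_num
      have hq : ¬ 0 < PySem.Int.floordiv numero 10 := by
        intro hc
        have := (PySem.Int.le_floordiv_iff_mul_le (a := numero) (b := 10) (q := 1) h10).mp hc
        omega
      rw [calcola_complemento2_alt, if_pos h, pvALoop, if_neg hq]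
      norm_num
  | case2 numero h ih =>
      have h10 : (0:Int) < 10 := by norm_num
      have hq : 0 < PySem.Int.floordiv numero 10 :=
        (PySem.Int.le_floordiv_iff_mul_le (a := numero) (b := 10) (q := 1) h10).mpr (by omega)
      have hA : pvALoop 1 numero = pvALoop 1 (PySem.Int.floordiv numero 10) + 1 := by
        rw [pvALoop, if_pos hq, pvALoop_shift]
      have hge : 1 ≤ pvALoop 1 (PySem.Int.floordiv numero 10) :=
        pvALoop_ge 1 (PySem.Int.floordiv numero 10)
      have htn : (pvALoop 1 (PySem.Int.floordiv numero 10) + 1).toNat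
          = (pvALoop 1 (PySem.Int.floordiv numero 10)).toNat + 1 := by omega
      have hdm : PySem.Int.floordiv numero 10 * 10 + PySem.Int.mod numero 10 = numero :=
        PySem.Int.floordiv_mul_add_mod numero 10
      rw [calcola_complemento2_alt, if_neg h, ih, hA, htn, pow_succ]
      nlinarith [hdm]

-- ===== VERDICT =====
theorem calcola_complemento2_spec : Claim_equal_calcola_complemento2 := by
  intro numero _
  unfold Spec_calcola_complemento2 calcola_complemento2
  rw [alt_eq]
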